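-- pv_equiv track=rewrite | github.com/pescuma/comicrack-plugins | SeriesInfoPanel/_utils.py | TranslateFieldName
-- ===== SOURCE A (Python) =====
-- _translations = {
-- 	'NumIssues': 'Num of books',
-- 	'ReadPercentage': 'Read' ,
-- 	'FullPublishers': 'Publishers/Imprints',
-- 	'NextIssueToRead': 'Next to Read'
-- 	}
--
-- def TranslateFieldName(name):
-- 	if name in _translations:
-- 		return _translations[name]
--
-- 	ret = ''
-- 	for i in range(len(name)):
-- 		c = name[i]
-- 		if i > 0 and c >= 'A' and c <= 'Z':
-- 			ret += ' '
-- 		ret += c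
-- 	return ret
-- ===== SOURCE B (Python) =====
-- _translations = {
-- 	'NumIssues': 'Num of books',
-- 	'ReadPercentage': 'Read' ,
-- 	'FullPublishers': 'Publishers/Imprints',
-- 	'NextIssueToRead': 'Next to Read'
-- 	}
--
-- def TranslateFieldName(name):
-- 	if name in _translations:
-- 		return _translations[name]
-- 	# stage 1: find the word boundaries (positions > 0 holding an ASCII uppercase letter)
-- 	cuts = [i for i in range(1, len(name)) if 'A' <= name[i] <= 'Z']
-- 	# stage 2: slice the name into words at those boundaries and join them with spaces
-- 	return ' '.join(name[s:e] for s, e in zip([0] + cuts, cuts + [len(name)]))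
-- ===== Notes on version B (the rewrite author's own statement) =====
-- stated objective: alternative
-- what changed: Instead of one pass that appends characters and conditionally a space, B first computes the list of word-boundary indices (uppercase positions after 0), then slices the name at those boundaries and joins the word slices with single spaces.
import Mathlib
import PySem

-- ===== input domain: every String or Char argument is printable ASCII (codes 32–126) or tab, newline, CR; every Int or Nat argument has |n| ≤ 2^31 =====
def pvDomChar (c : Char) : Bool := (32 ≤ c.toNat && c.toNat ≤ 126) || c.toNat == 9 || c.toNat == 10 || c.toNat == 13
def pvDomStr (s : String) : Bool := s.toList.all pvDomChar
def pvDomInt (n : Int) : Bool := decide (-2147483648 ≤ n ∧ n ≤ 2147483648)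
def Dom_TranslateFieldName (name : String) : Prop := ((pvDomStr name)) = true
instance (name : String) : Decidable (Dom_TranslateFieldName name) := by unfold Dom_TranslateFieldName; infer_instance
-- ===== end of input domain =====

-- B replaces A's single char-appending pass by two stages: collect the uppercase boundary
-- indices, then slice the name at them and join the slices with spaces; objective: alternative.

-- ===== PORT A =====
def pvTranslations : PySem.Dict String String :=
  PySem.Dict.ofList [("NumIssues", "Num of books"), ("ReadPercentage", "Read"),
    ("FullPublishers", "Publishers/Imprints"), ("NextIssueToRead", "Next to Read")]

-- 'ret' is built as a List Char and wrapped by String.ofList once (exact: Python '+=' on str);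
-- name[i] is PySem.List.pyGetD on the char list — exact here since i ranges over range(len(name)).
def TranslateFieldName (name : String) : String :=
  if PySem.Dict.contains pvTranslations name then
    (PySem.Dict.get? pvTranslations name).getD ""
  else
    String.ofList ((PySem.List.pyRange 0 (name.toList.length : Int) 1).foldl
      (fun ret i =>
        let c := PySem.List.pyGetD name.toList i ' '
        let ret := if 0 < i ∧ 'A' ≤ c ∧ c ≤ 'Z' then ret ++ [' '] else ret
        ret ++ [c]) ([] : List Char))

-- ===== PORT B =====
-- 'A' <= name[i] <= 'Z'
def pvUp (c : Char) : Bool := decide ('A' ≤ c ∧ c ≤ 'Z')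

-- cuts = [i for i in range(1, len(name)) if 'A' <= name[i] <= 'Z']
def pvCutsFrom (l : List Char) (a : Int) : List Int :=
  (PySem.List.pyRange a (l.length : Int) 1).filter (fun i => pvUp (PySem.List.pyGetD l i ' '))

-- ' '.join(name[s:e] for s, e in zip([0] + cuts, cuts + [len(name)]))
def TranslateFieldName_alt (name : String) : String :=
  if PySem.Dict.contains pvTranslations name then
    (PySem.Dict.get? pvTranslations name).getD ""
  else
    let cuts := pvCutsFrom name.toList 1
    PySem.Str.join " "
      ((List.zip (0 :: cuts) (cuts ++ [(name.toList.length : Int)])).map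
        (fun p => PySem.Str.slice name (some p.1) (some p.2)))

-- ===== PRECONDITION & SPEC =====
def Spec_TranslateFieldName (name : String) (out : String) : Prop := out = TranslateFieldName_alt name
instance (name : String) (out : String) : Decidable (Spec_TranslateFieldName name out) := by unfold Spec_TranslateFieldName; infer_instance

-- ===== CLAIM (what is proved, stated in full; the proofs are below) =====
def Claim_equal_TranslateFieldName : Prop := ∀ (name : String), Dom_TranslateFieldName name → Spec_TranslateFieldName name (TranslateFieldName name)

-- ===== LEMMAS AND PROOFS =====

-- the chunk a single character contributes to the spaced-out result
def pvSpace (c : Char) : List Char := if pvUp c then [' ', c] else [c]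

-- extending a slice by one character
lemma pv_slice_snoc (l : List Char) (p a : Int) (h0 : 0 ≤ p) (h1 : p ≤ a)
    (h2 : a < (l.length : Int)) :
    PySem.List.slice l (some p) (some (a + 1)) =
      PySem.List.slice l (some p) (some a) ++ [l[a.toNat]'(by omega)] := by
  rw [PySem.List.slice_toNat l h0 (by omega), PySem.List.slice_toNat l h0 (by omega)]
  have hp : p.toNat ≤ a.toNat := by omega
  have hh : (a + 1).toNat - p.toNat = (a.toNat - p.toNat) + 1 := by omega
  rw [hh, List.take_add_one]
  congr 1
  have hidx : (l.drop p.toNat)[a.toNat - p.toNat]? = some (l[a.toNat]'(by omega)) := by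
    rw [List.getElem?_drop]
    have hpa : p.toNat + (a.toNat - p.toNat) = a.toNat := by omega
    rw [hpa, List.getElem?_eq_getElem (by omega)]
  simp [hidx]

-- Chars.join over a cons whose tail is nonempty
lemma pv_join_cons (sep p : List Char) (rest : List (List Char)) (h : rest ≠ []) :
    PySem.Chars.join sep (p :: rest) = p ++ sep ++ PySem.Chars.join sep rest := by
  cases rest with
  | nil => exact absurd rfl h
  | cons q r => exact PySem.Chars.join_cons_cons sep p q r

-- B's join of the slices between cut points from a, preceded by an open slice from p,
-- equals that open slice followed by the pvSpace-expansion of the suffix from a.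
lemma pv_joinB (l : List Char) : ∀ (n : Nat) (a p : Int), 0 ≤ p → p ≤ a →
    a + (n : Int) = (l.length : Int) →
    PySem.Chars.join [' ']
      ((List.zip (p :: pvCutsFrom l a) (pvCutsFrom l a ++ [(l.length : Int)])).map
        (fun q => PySem.List.slice l (some q.1) (some q.2)))
    = PySem.List.slice l (some p) (some a) ++ (l.drop a.toNat).flatMap pvSpace := by
  intro n
  induction n with
  | zero =>
    intro a p h0 h1 h2
    have hcut : pvCutsFrom l a = [] := by
      unfold pvCutsFrom
      rw [PySem.List.pyRange_one_eq_nil (by omega)]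
      rfl
    have hdrop : l.drop a.toNat = [] := by
      apply List.drop_eq_nil_of_le
      omega
    simp only [hcut, hdrop, List.nil_append, List.zip_cons_cons, List.zip_nil_left,
      List.map_cons, List.map_nil, PySem.Chars.join_singleton, List.flatMap_nil,
      List.append_nil]
    congr 2
    omega
  | succ n ih =>
    intro a p h0 h1 h2
    have hlt : a < (l.length : Int) := by omega
    have hna : a.toNat < l.length := by omega
    have hget : PySem.List.pyGetD l a ' ' = l[a.toNat] :=
      PySem.List.pyGetD_eq_getElem l ' ' (by omega) hlt
    have hcut : pvCutsFrom l a =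
        (if pvUp (l[a.toNat]'hna) then [a] else []) ++ pvCutsFrom l (a + 1) := by
      unfold pvCutsFrom
      rw [PySem.List.pyRange_one_cons hlt]
      rw [List.filter_cons]
      rw [hget]
      split <;> simp
    have hdrop : l.drop a.toNat = l[a.toNat] :: l.drop (a.toNat + 1) :=
      List.drop_eq_getElem_cons hna
    have hnat : (a + 1).toNat = a.toNat + 1 := by omega
    by_cases hu : pvUp (l[a.toNat]'hna)
    · -- l[a] uppercase: a is a cut point; the join inserts ' ' before slice [a, a+1)
      rw [hcut, if_pos hu]
      simp only [List.zip_cons_cons, List.map_cons, List.cons_append, List.nil_append]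
      rw [pv_join_cons _ _ _ (by
        intro hnil
        have := congrArg List.length hnil
        simp [List.length_zip] at this)]
      rw [ih (a + 1) a (by omega) (by omega) (by omega)]
      rw [hdrop]
      simp only [List.flatMap_cons, pvSpace, if_pos hu, hnat]
      have h11 : PySem.List.slice l (some a) (some (a + 1)) =
          PySem.List.slice l (some a) (some a) ++ [l[a.toNat]] :=
        pv_slice_snoc l a a (by omega) le_rfl hlt
      have h00 : PySem.List.slice l (some a) (some a) = [] := by
        rw [PySem.List.slice_toNat l (by omega) (by omega)]
        simp
      rw [h11, h00]
      simp [List.append_assoc]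
    · -- l[a] not uppercase: no cut at a; the open slice simply absorbs l[a]
      rw [hcut, if_neg hu]
      simp only [List.nil_append]
      rw [ih (a + 1) p (by omega) (by omega) (by omega)]
      rw [pv_slice_snoc l p a h0 h1 hlt, hdrop]
      simp only [List.flatMap_cons, pvSpace, if_neg hu, hnat]
      simp [List.append_assoc]

-- A's loop from index a ≥ 1 appends exactly the pvSpace-expansion of the dropped suffix.
lemma pv_loopA (l : List Char) (k : Nat) : ∀ (a : Int) (acc : List Char), 1 ≤ a → a + k = (l.length : Int) →
    (PySem.List.pyRange a (l.length : Int) 1).foldl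
      (fun ret i =>
        (if 0 < i ∧ 'A' ≤ PySem.List.pyGetD l i ' ' ∧ PySem.List.pyGetD l i ' ' ≤ 'Z'
          then ret ++ [' '] else ret) ++ [PySem.List.pyGetD l i ' ']) acc
    = acc ++ (l.drop a.toNat).flatMap pvSpace := by
  induction k with
  | zero =>
    intro a acc h1 h2
    rw [PySem.List.pyRange_one_eq_nil (by omega)]
    have : a.toNat = l.length := by omega
    simp [this]
  | succ k ih =>
    intro a acc h1 h2
    have hlt : a < (l.length : Int) := by omega
    rw [PySem.List.pyRange_one_cons hlt]
    simp only [List.foldl_cons]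
    rw [ih (a + 1) _ (by omega) (by omega)]
    have hna : a.toNat < l.length := by omega
    have hc : PySem.List.pyGetD l a ' ' = l[a.toNat] :=
      PySem.List.pyGetD_eq_getElem l ' ' (by omega) hlt
    have hdrop : l.drop a.toNat = l[a.toNat] :: l.drop (a.toNat + 1) :=
      List.drop_eq_getElem_cons hna
    have hnat : (a + 1).toNat = a.toNat + 1 := by omega
    rw [hnat, hdrop]
    simp only [List.flatMap_cons, hc, pvSpace, pvUp]
    have h0 : (0 : Int) < a := by omega
    by_cases hu : 'A' ≤ l[a.toNat] ∧ l[a.toNat] ≤ 'Z' <;>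
      simp [hu, h0, List.append_assoc]

-- ===== VERDICT (by name: the statement is the Claim_ definition above) =====

theorem TranslateFieldName_spec : Claim_equal_TranslateFieldName := by
  intro name _
  unfold Spec_TranslateFieldName TranslateFieldName TranslateFieldName_alt
  by_cases hc : PySem.Dict.contains pvTranslations name = true
  · simp [hc]
  · simp only [hc, Bool.false_eq_true, if_neg, not_false_eq_true]
    have hB : (PySem.Str.join " "
        ((List.zip (0 :: pvCutsFrom name.toList 1) (pvCutsFrom name.toList 1 ++ [(name.toList.length : Int)])).map
          (fun p => PySem.Str.slice name (some p.1) (some p.2)))).toList =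
        PySem.Chars.join [' ']
          ((List.zip (0 :: pvCutsFrom name.toList 1) (pvCutsFrom name.toList 1 ++ [(name.toList.length : Int)])).map
            (fun q => PySem.List.slice name.toList (some q.1) (some q.2))) := by
      rw [PySem.Str.toList_join]
      simp [Function.comp_def, PySem.Str.toList_slice]
    rw [String.ofList_eq.mpr ?_]
    rw [hB]
    generalize name.toList = l
    cases l with
    | nil =>
      unfold pvCutsFrom
      simp [PySem.List.pyRange_one_eq_nil, PySem.Chars.join_singleton,
        PySem.List.slice_toNat]
    | cons c t =>
      rw [pv_joinB (c :: t) t.length 1 0 le_rfl (by omega)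
        (by simp [List.length_cons]; omega)]
      rw [PySem.List.pyRange_one_cons (by exact_mod_cast t.length.succ_pos)]
      simp only [List.foldl_cons, PySem.List.pyGetD_zero_cons]
      have h00 : ¬ ((0:Int) < 0 ∧ 'A' ≤ c ∧ c ≤ 'Z') := by simp
      rw [if_neg h00]
      simp only [zero_add]
      rw [pv_loopA (c :: t) t.length 1 ([] ++ [c]) (le_refl 1)
        (by simp [List.length_cons]; omega)]
      rw [PySem.List.slice_toNat _ le_rfl (by omega)]
      simp
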